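-- pv_equiv track=rewrite | github.com/marceloteck/megasenav3.0 | MEGA-SENA/MegaSena_static.1.0.py | calcular_LT
-- ===== SOURCE A (Python) =====
-- def calcular_LT(sequencia_atual, sequencia_referencia):
--     resultado_LT = []
--     for num_atual, num_ref in zip(sequencia_atual, sequencia_referencia):
--         subtracao = num_atual - num_ref
--         soma_digitos = sum(map(int, str(num_atual))) + sum(map(int, str(num_ref)))
--         ajuste = subtracao + soma_digitos
--
--         # Ajuste final (dentro do intervalo 1-60)
--         while ajuste < 1 or ajuste > 60:
--             ajuste = ajuste - 60 if ajuste > 60 else ajuste + 60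
--         resultado_LT.append(ajuste)
--
--     return resultado_LT
-- ===== SOURCE B (Python) =====
-- def calcular_LT(sequencia_atual, sequencia_referencia):
--     def dsum(n):
--         s = 0
--         while n > 0:
--             s += n % 10
--             n //= 10
--         return s
--     return [((a - r + dsum(a) + dsum(r) - 1) % 60) + 1
--             for a, r in zip(sequencia_atual, sequencia_referencia)]
-- ===== Notes on version B (the rewrite author's own statement) =====
-- stated objective: alternative
-- what changed: The per-element while-loop that repeatedly adds/subtracts 60 is replaced by the closed-form modular reduction ((x-1) % 60) + 1, and the string-based digit sum sum(map(int,str(n))) by an arithmetic divmod digit-sum loop; the whole function becomes a single list comprehension.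
import Mathlib
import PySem

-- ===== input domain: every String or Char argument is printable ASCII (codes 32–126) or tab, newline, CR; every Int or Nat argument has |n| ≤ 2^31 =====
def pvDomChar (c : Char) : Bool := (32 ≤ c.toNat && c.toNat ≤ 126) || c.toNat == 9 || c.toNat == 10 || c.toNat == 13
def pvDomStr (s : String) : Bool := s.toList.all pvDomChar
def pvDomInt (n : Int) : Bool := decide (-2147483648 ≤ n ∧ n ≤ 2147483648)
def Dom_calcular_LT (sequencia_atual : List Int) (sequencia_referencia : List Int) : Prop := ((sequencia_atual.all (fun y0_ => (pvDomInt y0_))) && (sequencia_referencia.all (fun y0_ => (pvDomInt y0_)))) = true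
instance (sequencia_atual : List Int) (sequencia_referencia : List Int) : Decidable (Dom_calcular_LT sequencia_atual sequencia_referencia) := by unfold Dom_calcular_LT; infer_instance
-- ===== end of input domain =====

-- B replaces A's per-element while-loop wrap (repeated ±60 steps) by the closed-form
-- modular reduction ((x-1) % 60) + 1 and the string digit sum by an arithmetic divmod
-- digit sum; objective: alternative (closed form vs iteration; not measured as faster).

-- ===== PORT A =====
-- int(c) for one character c of str(n); on '-' Python raises ValueError (excluded by Pre_),
-- here Option.getD 0 stands where Python would raise.
def pyDigitVal (c : Char) : Int := (PySem.Int.ofStr? (String.ofList [c])).getD 0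

-- sum(map(int, str(n)))
def digitSumA (n : Int) : Int := (((PySem.Int.toStr n).toList).map pyDigitVal).sum

-- the while-loop:  while ajuste < 1 or ajuste > 60: ajuste = ajuste - 60 if ajuste > 60 else ajuste + 60
def pyWrap (a : Int) : Int :=
  if a < 1 ∨ a > 60 then
    pyWrap (if a > 60 then a - 60 else a + 60)
  else a
termination_by (if a > 60 then a - 60 else 1 - a).toNat
decreasing_by split_ifs <;> omega

def calcular_LT (sequencia_atual : List Int) (sequencia_referencia : List Int) : List Int :=
  (sequencia_atual.zip sequencia_referencia).foldl
    (fun resultado_LT p =>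
      let subtracao := p.1 - p.2
      let soma_digitos := digitSumA p.1 + digitSumA p.2
      let ajuste := subtracao + soma_digitos
      resultado_LT ++ [pyWrap ajuste]) []

-- ===== PORT B =====
-- arithmetic digit sum:  while n > 0: s += n % 10; n //= 10
def dsumB (n : Int) : Int :=
  if n > 0 then PySem.Int.mod n 10 + dsumB (PySem.Int.floordiv n 10) else 0
termination_by n.toNat
decreasing_by rw [PySem.Int.floordiv_eq_ediv_of_pos (by omega)]; omega

def calcular_LT_alt (sequencia_atual : List Int) (sequencia_referencia : List Int) : List Int :=
  (sequencia_atual.zip sequencia_referencia).map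
    (fun p => PySem.Int.mod (p.1 - p.2 + dsumB p.1 + dsumB p.2 - 1) 60 + 1)

-- ===== PRECONDITION & SPEC =====
-- A raises ValueError on any zipped pair with a negative member (int('-') on the sign of str(n));
-- exactly those inputs are excluded.
def Pre_calcular_LT (sequencia_atual : List Int) (sequencia_referencia : List Int) : Prop :=
  ∀ p ∈ sequencia_atual.zip sequencia_referencia, 0 ≤ p.1 ∧ 0 ≤ p.2
instance (sequencia_atual : List Int) (sequencia_referencia : List Int) : Decidable (Pre_calcular_LT sequencia_atual sequencia_referencia) := by unfold Pre_calcular_LT; infer_instance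
def pvWitness_calcular_LT : List Int × List Int := ([10, 25, 60], [4, 25, 1])

def Spec_calcular_LT (sequencia_atual : List Int) (sequencia_referencia : List Int) (out : List Int) : Prop := out = calcular_LT_alt sequencia_atual sequencia_referencia
instance (sequencia_atual : List Int) (sequencia_referencia : List Int) (out : List Int) : Decidable (Spec_calcular_LT sequencia_atual sequencia_referencia out) := by unfold Spec_calcular_LT; infer_instance

-- ===== CLAIM (what is proved, stated in full; the proofs are below) =====
def Claim_equal_calcular_LT : Prop := ∀ (sequencia_atual : List Int) (sequencia_referencia : List Int), Dom_calcular_LT sequencia_atual sequencia_referencia → Pre_calcular_LT sequencia_atual sequencia_referencia → Spec_calcular_LT sequencia_atual sequencia_referencia (calcular_LT sequencia_atual sequencia_referencia)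

-- ===== LEMMAS AND PROOFS =====

-- unfolding equations for dsumB (well-founded definition)
theorem dsumB_of_pos {n : Int} (h : 0 < n) :
    dsumB n = PySem.Int.mod n 10 + dsumB (PySem.Int.floordiv n 10) := by
  rw [dsumB, if_pos h]

theorem dsumB_of_nonpos {n : Int} (h : n ≤ 0) : dsumB n = 0 := by
  rw [dsumB, if_neg (by omega)]

-- the while-loop wrap equals the closed-form modular reduction
theorem pyWrap_eq_mod (a : Int) : pyWrap a = PySem.Int.mod (a - 1) 60 + 1 := by
  rw [PySem.Int.mod_eq_emod_of_pos (by norm_num)]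
  induction a using pyWrap.induct with
  | case1 a h ih =>
    rw [pyWrap, if_pos h]
    by_cases hgt : a > 60
    · simp only [hgt, if_true, dite_true] at ih ⊢
      rw [ih, show a - 60 - 1 = a - 1 - 60 by ring, Int.sub_emod_right]
    · simp only [hgt, if_false, dite_false] at ih ⊢
      rw [ih, show a + 60 - 1 = a - 1 + 60 by ring, Int.add_emod_right]
  | case2 a h =>
    rw [pyWrap, if_neg h]
    rw [Int.emod_eq_of_lt (by omega) (by omega)]
    omega

-- value of int(·) on a decimal digit character
theorem pyDigitVal_digitChar (d : Nat) (hd : d < 10) :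
    pyDigitVal (Nat.digitChar d) = (d : Int) := by
  interval_cases d <;> decide

-- dsumB steps on naturals
theorem dsumB_natCast (m : Nat) (hm : 0 < m) :
    dsumB (m : Int) = ((m % 10 : Nat) : Int) + dsumB ((m / 10 : Nat) : Int) := by
  rw [dsumB_of_pos (by exact_mod_cast hm),
    show PySem.Int.mod (m : Int) 10 = ((m % 10 : Nat) : Int) from
      by exact_mod_cast PySem.Int.mod_natCast m 10,
    show PySem.Int.floordiv (m : Int) 10 = ((m / 10 : Nat) : Int) from
      by exact_mod_cast PySem.Int.floordiv_natCast m 10]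

-- digit sum over toDigitsCore
theorem sum_toDigitsCore (fuel : Nat) :
    ∀ (m : Nat) (l : List Char), m < fuel →
      ((Nat.toDigitsCore 10 fuel m l).map pyDigitVal).sum
        = dsumB (m : Int) + (l.map pyDigitVal).sum := by
  induction fuel with
  | zero => intro m l h; omega
  | succ f ih =>
    intro m l h
    rw [Nat.toDigitsCore]
    by_cases h0 : m / 10 = 0
    · simp only [h0, if_true]
      simp only [List.map_cons, List.sum_cons, pyDigitVal_digitChar (m % 10) (by omega)]
      by_cases hz : m = 0
      · subst hz; rw [Nat.cast_zero, dsumB_of_nonpos le_rfl]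
      · rw [dsumB_natCast m (by omega), h0, dsumB_of_nonpos (by norm_num)]
        (try push_cast); (try ring)
    · simp only [h0, if_false]
      rw [ih (m / 10) _ (by omega)]
      simp only [List.map_cons, List.sum_cons, pyDigitVal_digitChar (m % 10) (by omega)]
      rw [dsumB_natCast m (by omega)]
      ring

-- the string digit sum of A equals the arithmetic digit sum of B on nonnegative inputs
theorem digitSumA_eq_dsumB (n : Int) (hn : 0 ≤ n) : digitSumA n = dsumB n := by
  rw [digitSumA, PySem.Int.toList_toStr, PySem.Int.toChars, if_neg (by omega),
    Nat.toDigits, sum_toDigitsCore _ _ _ (by omega)]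
  simp [Int.toNat_of_nonneg hn]

-- ===== VERDICT (by name: the statement is the Claim_ definition above) =====
theorem calcular_LT_spec : Claim_equal_calcular_LT := by
  intro sequencia_atual sequencia_referencia _ hpre
  unfold Spec_calcular_LT calcular_LT calcular_LT_alt
  rw [PySem.List.foldl_append_singleton_eq_map, List.nil_append]
  apply List.map_congr_left
  intro p hp
  rcases hpre p hp with ⟨h1, h2⟩
  rw [pyWrap_eq_mod, digitSumA_eq_dsumB _ h1, digitSumA_eq_dsumB _ h2]
  congr 2
  ring
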